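-- pv_equiv track=rewrite | github.com/cck181851/Solutions-to-Leetcode-Problems | leetcode-python.py | countOfPeaks
-- ===== SOURCE A (Python) =====
-- from typing import List
--
-- def countOfPeaks(nums: List[int], queries: List[List[int]]) -> List[int]:
--     n=len(nums)
--     tree=[0]*(n+1)
--
--     def check(idx):
--         return idx>0 and idx<n-1 and nums[idx-1]<nums[idx]>nums[idx+1]
--
--     def add(idx,val):
--         idx+=1
--         while idx<len(tree):
--             tree[idx]+=val
--             idx+=idx&(-idx)
--
--     def getVal(idx):
--         idx,res=idx+1,0
--         while idx>0:
--             res+=tree[idx]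
--             idx-=idx&(-idx)
--         return res
--
--     for i in range(1,n):
--         if check(i):
--             add(i,1)
--
--     res=[]
--     for a,b,c in queries:
--         if a==1:
--             left=check(b)
--             right=check(c)
--             res+=[getVal(c)-(getVal(b-1) if b>0 else 0)-left-right if b!=c else 0]
--         else:
--             prev=[(b-1,check(b-1)),(b,check(b)),(b+1,check(b+1))]
--             nums[b]=c
--             cur=[(b-1,check(b-1)),(b,check(b)),(b+1,check(b+1))]
--             for a,b in zip(prev,cur):
--                 idx=b[0]
--                 change=b[1]-a[1]
--                 if idx>0:add(idx,change)
--
--     return res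
-- ===== SOURCE B (Python) =====
-- def countOfPeaks(nums, queries):
--     n = len(nums)
--
--     def check(i):
--         return 0 < i < n - 1 and nums[i - 1] < nums[i] > nums[i + 1]
--
--     # per-index counters (the net peak-status deltas), summed linearly per query
--     cnt = {i: 1 for i in range(1, n - 1) if check(i)}
--     res = []
--     for a, b, c in queries:
--         if a == 1:
--             if b == c:
--                 res.append(0)
--             else:
--                 total = sum(v for i, v in cnt.items() if i <= c)
--                 if b > 0:
--                     total -= sum(v for i, v in cnt.items() if i <= b - 1)
--                 res.append(total - check(b) - check(c))
--         else:
--             old = [check(j) for j in (b - 1, b, b + 1)]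
--             nums[b] = c
--             for j, o in zip((b - 1, b, b + 1), old):
--                 if j > 0:
--                     cnt[j] = cnt.get(j, 0) + check(j) - o
--     return res
-- ===== Notes on version B (the rewrite author's own statement) =====
-- stated objective: simpler
-- what changed: Replaces the Fenwick (binary-indexed) tree with its bit-twiddling add/prefix-sum loops by a plain dict of per-index counters: count queries sum the counters up to each bound with a linear comprehension, update queries add the peak-status delta of the three indices b-1,b,b+1 to the dict.
import Mathlib
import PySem

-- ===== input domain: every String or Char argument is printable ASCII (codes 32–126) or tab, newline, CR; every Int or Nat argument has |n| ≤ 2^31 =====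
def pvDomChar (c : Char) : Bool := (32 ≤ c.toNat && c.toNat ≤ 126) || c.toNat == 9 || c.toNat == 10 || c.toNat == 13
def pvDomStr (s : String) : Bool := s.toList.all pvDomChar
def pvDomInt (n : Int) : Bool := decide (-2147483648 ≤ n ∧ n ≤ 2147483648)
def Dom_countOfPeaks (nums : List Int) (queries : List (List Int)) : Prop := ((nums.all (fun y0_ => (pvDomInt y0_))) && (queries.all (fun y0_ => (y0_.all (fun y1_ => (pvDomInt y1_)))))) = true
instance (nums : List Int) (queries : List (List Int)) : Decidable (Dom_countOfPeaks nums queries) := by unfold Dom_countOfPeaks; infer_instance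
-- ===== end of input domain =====

-- B replaces A's Fenwick (binary-indexed) tree and its bit-twiddling add/prefix-sum loops by a plain
-- dict of per-index counters summed linearly per query (simpler; return value only: both Pythons
-- mutate nums[b] in place on update queries, identically).

-- ===== PORT A =====
def pvB2I (b : Bool) : Int := if b then 1 else 0

def pvCheckA (nums : List Int) (idx : Int) : Bool :=
  idx > 0 && idx < (nums.length : Int) - 1 &&
    (PySem.List.pyGetD nums (idx - 1) 0 < PySem.List.pyGetD nums idx 0 &&
     PySem.List.pyGetD nums idx 0 > PySem.List.pyGetD nums (idx + 1) 0)

-- while idx < len(tree): tree[idx] += val; idx += idx & (-idx)   (fuel = len(tree): idx ≥ 1 grows each step)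
def pvAddLoop : Nat → List Int → Int → Int → List Int
  | 0, tree, _, _ => tree
  | fuel + 1, tree, idx, val =>
    if idx < (tree.length : Int) then
      pvAddLoop fuel (PySem.List.pySetD tree idx (PySem.List.pyGetD tree idx 0 + val))
        (idx + PySem.Int.band idx (-idx)) val
    else tree

def pvAdd (tree : List Int) (idx val : Int) : List Int := pvAddLoop tree.length tree (idx + 1) val

-- while idx > 0: res += tree[idx]; idx -= idx & (-idx)   (fuel = idx: idx ≥ 1 shrinks each step)
def pvGetLoop : Nat → List Int → Int → Int → Int
  | 0, _, _, res => res
  | fuel + 1, tree, idx, res =>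
    if idx > 0 then
      pvGetLoop fuel tree (idx - PySem.Int.band idx (-idx)) (res + PySem.List.pyGetD tree idx 0)
    else res

def pvGetVal (tree : List Int) (idx : Int) : Int := pvGetLoop (idx + 1).toNat tree (idx + 1) 0

def pvStepA (st : List Int × List Int × List Int) (q : List Int) : List Int × List Int × List Int :=
  let nums := st.1
  let tree := st.2.1
  let res := st.2.2
  let a := PySem.List.pyGetD q 0 0
  let b := PySem.List.pyGetD q 1 0
  let c := PySem.List.pyGetD q 2 0
  if a = 1 then
    let left := pvB2I (pvCheckA nums b)
    let right := pvB2I (pvCheckA nums c)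
    (nums, tree,
      res ++ [if b ≠ c then
                pvGetVal tree c - (if b > 0 then pvGetVal tree (b - 1) else 0) - left - right
              else 0])
  else
    let prev := [(b - 1, pvCheckA nums (b - 1)), (b, pvCheckA nums b), (b + 1, pvCheckA nums (b + 1))]
    let nums' := PySem.List.pySetD nums b c
    let cur := [(b - 1, pvCheckA nums' (b - 1)), (b, pvCheckA nums' b), (b + 1, pvCheckA nums' (b + 1))]
    let tree' := (prev.zip cur).foldl
      (fun t pq => if pq.2.1 > 0 then pvAdd t pq.2.1 (pvB2I pq.2.2 - pvB2I pq.1.2) else t) tree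
    (nums', tree', res)

def countOfPeaks (nums : List Int) (queries : List (List Int)) : List Int :=
  let n := nums.length
  let tree0 := (PySem.List.pyRange 1 (n : Int) 1).foldl
    (fun tree i => if pvCheckA nums i then pvAdd tree i 1 else tree) (List.replicate (n + 1) 0)
  (queries.foldl pvStepA (nums, tree0, [])).2.2

-- ===== PORT B =====
def pvCheckB (nums : List Int) (i : Int) : Bool :=
  0 < i && i < (nums.length : Int) - 1 &&
    (PySem.List.pyGetD nums (i - 1) 0 < PySem.List.pyGetD nums i 0 &&
     PySem.List.pyGetD nums i 0 > PySem.List.pyGetD nums (i + 1) 0)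

-- cnt.get(j, 0) on the association list (first match, default 0)
def pvDGet : List (Int × Int) → Int → Int
  | [], _ => 0
  | kv :: t, k => if kv.1 = k then kv.2 else pvDGet t k

-- cnt[j] = v : overwrite the first binding of j in place, else append
def pvDSet : List (Int × Int) → Int → Int → List (Int × Int)
  | [], k, v => [(k, v)]
  | kv :: t, k, v => if kv.1 = k then (k, v) :: t else kv :: pvDSet t k v

-- sum(v for i, v in cnt.items() if i <= q)
def pvPrefix (cnt : List (Int × Int)) (q : Int) : Int :=
  ((cnt.filter (fun kv => decide (kv.1 ≤ q))).map Prod.snd).sum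

def pvStepB (st : List Int × List (Int × Int) × List Int) (q : List Int) :
    List Int × List (Int × Int) × List Int :=
  let nums := st.1
  let cnt := st.2.1
  let res := st.2.2
  let a := PySem.List.pyGetD q 0 0
  let b := PySem.List.pyGetD q 1 0
  let c := PySem.List.pyGetD q 2 0
  if a = 1 then
    (nums, cnt,
      res ++ [if b = c then 0 else
        (pvPrefix cnt c - (if b > 0 then pvPrefix cnt (b - 1) else 0))
          - pvB2I (pvCheckB nums b) - pvB2I (pvCheckB nums c)])
  else
    let old := [pvCheckB nums (b - 1), pvCheckB nums b, pvCheckB nums (b + 1)]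
    let nums' := PySem.List.pySetD nums b c
    let cnt' := ([b - 1, b, b + 1].zip old).foldl
      (fun d jo => if jo.1 > 0 then
          pvDSet d jo.1 (pvDGet d jo.1 + (pvB2I (pvCheckB nums' jo.1) - pvB2I jo.2))
        else d) cnt
    (nums', cnt', res)

def countOfPeaks_alt (nums : List Int) (queries : List (List Int)) : List Int :=
  let n := nums.length
  let cnt0 : List (Int × Int) :=
    ((PySem.List.pyRange 1 ((n : Int) - 1) 1).filter (pvCheckB nums)).map (fun i => (i, 1))
  (queries.foldl pvStepB (nums, cnt0, [])).2.2

-- ===== PRECONDITION & SPEC =====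
-- Pre_ excludes exactly the inputs on which A RAISES: a query whose length is not 3 (ValueError on
-- unpacking), a count query [1,b,c] with b ≠ c whose Fenwick prefix reads go out of range
-- (c ≥ n, or 0 < b with n < b), or an update query [a,b,c] whose write nums[b] = c is out of
-- Python's index range (b < -n or n ≤ b).  On every input A returns on, Pre_ holds.
def pvQOK (n : Int) (q : List Int) : Prop :=
  q.length = 3 ∧
  (PySem.List.pyGetD q 0 0 = 1 →
    PySem.List.pyGetD q 1 0 ≠ PySem.List.pyGetD q 2 0 →
      PySem.List.pyGetD q 2 0 ≤ n - 1 ∧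
      (0 < PySem.List.pyGetD q 1 0 → PySem.List.pyGetD q 1 0 ≤ n)) ∧
  (PySem.List.pyGetD q 0 0 ≠ 1 →
    -n ≤ PySem.List.pyGetD q 1 0 ∧ PySem.List.pyGetD q 1 0 < n)

def Pre_countOfPeaks (nums : List Int) (queries : List (List Int)) : Prop :=
  ∀ q ∈ queries, pvQOK (nums.length : Int) q

instance (nums : List Int) (queries : List (List Int)) : Decidable (Pre_countOfPeaks nums queries) := by
  unfold Pre_countOfPeaks pvQOK; infer_instance

def pvWitness_countOfPeaks : List Int × List (List Int) :=
  ([1, 3, 1, 2, 5, 2], [[1, 0, 5], [2, 1, 0], [1, 0, 5], [2, -1, 9], [1, 0, 5], [1, 4, 2]])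

def Spec_countOfPeaks (nums : List Int) (queries : List (List Int)) (out : List Int) : Prop :=
  out = countOfPeaks_alt nums queries
instance (nums : List Int) (queries : List (List Int)) (out : List Int) :
    Decidable (Spec_countOfPeaks nums queries out) := by unfold Spec_countOfPeaks; infer_instance

-- ===== CLAIM (what is proved, stated in full; the proofs are below) =====
def Claim_equal_countOfPeaks : Prop :=
  ∀ (nums : List Int) (queries : List (List Int)), Dom_countOfPeaks nums queries →
    Pre_countOfPeaks nums queries → Spec_countOfPeaks nums queries (countOfPeaks nums queries)

-- ===== LEMMAS AND PROOFS =====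

-- ---- lowbit arithmetic (Nat side) ----
def pvLb (n : Nat) : Nat := n - (n &&& (n - 1))

theorem pvLb_le (n : Nat) : pvLb n ≤ n := by
  unfold pvLb; omega

theorem pv_and_two_mul_add_one_left (a b : Nat) : (2 * a + 1) &&& (2 * b) = 2 * (a &&& b) := by
  have := Nat.bitwise_bit (f := and) (a := true) (m := a) (b := false) (n := b) (by rfl)
  simpa [Nat.bit, HAnd.hAnd, AndOp.and, Nat.land, two_mul] using this

theorem pvLb_odd (n : Nat) (h : n % 2 = 1) : pvLb n = 1 := by
  obtain ⟨a, rfl⟩ : ∃ a, n = 2 * a + 1 := ⟨n / 2, by omega⟩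
  have h1 : (2 * a + 1) - 1 = 2 * a := by omega
  unfold pvLb
  rw [h1, pv_and_two_mul_add_one_left, Nat.and_self a]
  omega

theorem pvLb_two_mul (a : Nat) : pvLb (2 * a) = 2 * pvLb a := by
  rcases Nat.eq_zero_or_pos a with rfl | ha
  · simp [pvLb]
  · have h1 : 2 * a - 1 = 2 * (a - 1) + 1 := by omega
    have h2 : (2 * a) &&& (2 * (a - 1) + 1) = 2 * (a &&& (a - 1)) := by
      rw [Nat.land_comm, pv_and_two_mul_add_one_left, Nat.land_comm]
    have h3 : a &&& (a - 1) ≤ a := Nat.and_le_left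
    unfold pvLb
    rw [h1, h2]
    omega

theorem pvLb_pos (n : Nat) (h : 1 ≤ n) : 1 ≤ pvLb n := by
  induction n using Nat.strong_induction_on with
  | _ n ih =>
    rcases Nat.even_or_odd n with ⟨a, ha⟩ | hodd
    · subst ha
      rw [show a + a = 2 * a by omega, pvLb_two_mul]
      have := ih a (by omega) (by omega)
      omega
    · rw [pvLb_odd n (Nat.odd_iff.mp hodd)]

theorem pvLb_even_parity (n : Nat) (h : n % 2 = 0) : pvLb n % 2 = 0 := by
  obtain ⟨a, rfl⟩ : ∃ a, n = 2 * a := ⟨n / 2, by omega⟩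
  rw [pvLb_two_mul]; omega

theorem pvLb_L2 (q i : Nat) (hi : 1 ≤ i) (h1 : i ≤ q - pvLb q) (h2 : i + pvLb i ≤ q) :
    i + pvLb i ≤ q - pvLb q := by
  induction q using Nat.strong_induction_on generalizing i with
  | _ q ih =>
    have hq : 1 ≤ q := by omega
    have hlbq := pvLb_le q
    have hlbi := pvLb_le i
    have hlbqp := pvLb_pos q hq
    have hlbip := pvLb_pos i hi
    rcases Nat.even_or_odd i with ⟨a, ha⟩ | hio
    · rcases Nat.even_or_odd q with ⟨b, hb⟩ | hqo
      · have ha2 : pvLb i = 2 * pvLb (i / 2) := by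
          have h' := pvLb_two_mul (i / 2)
          rw [show 2 * (i / 2) = i by omega] at h'; exact h'
        have hb2 : pvLb q = 2 * pvLb (q / 2) := by
          have h' := pvLb_two_mul (q / 2)
          rw [show 2 * (q / 2) = q by omega] at h'; exact h'
        have hlbb := pvLb_le (q / 2)
        have := ih (q / 2) (by omega) (i / 2) (by omega) (by omega) (by omega)
        omega
      · have hq1 := pvLb_odd q (Nat.odd_iff.mp hqo)
        have hpar : (i + pvLb i) % 2 = 0 := by
          subst ha
          have := pvLb_even_parity (a + a) (by omega)
          omega
        have : q % 2 = 1 := Nat.odd_iff.mp hqo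
        omega
    · have hi1 := pvLb_odd i (Nat.odd_iff.mp hio)
      rcases Nat.even_or_odd q with ⟨b, hb⟩ | hqo
      · have hpar := pvLb_even_parity q (by omega)
        have : q % 2 = 0 := by omega
        have : i % 2 = 1 := Nat.odd_iff.mp hio
        omega
      · have hq1 := pvLb_odd q (Nat.odd_iff.mp hqo)
        have : i % 2 = 1 := Nat.odd_iff.mp hio
        have : q % 2 = 1 := Nat.odd_iff.mp hqo
        omega

theorem pvLb_L3 (q i : Nat) (hi : 1 ≤ i) (h1 : i < q) (h2 : q < i + pvLb i) :
    i ≤ q - pvLb q := by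
  induction q using Nat.strong_induction_on generalizing i with
  | _ q ih =>
    have hlbq := pvLb_le q
    rcases Nat.even_or_odd q with ⟨b, hb⟩ | hqo
    · rcases Nat.even_or_odd i with ⟨a, ha⟩ | hio
      · have ha2 : pvLb i = 2 * pvLb (i / 2) := by
          have h' := pvLb_two_mul (i / 2)
          rw [show 2 * (i / 2) = i by omega] at h'; exact h'
        have hb2 : pvLb q = 2 * pvLb (q / 2) := by
          have h' := pvLb_two_mul (q / 2)
          rw [show 2 * (q / 2) = q by omega] at h'; exact h'
        have hlbb := pvLb_le (q / 2)
        have hlbi := pvLb_le (i / 2)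
        have := ih (q / 2) (by omega) (i / 2) (by omega) (by omega) (by omega)
        omega
      · have := pvLb_odd i (Nat.odd_iff.mp hio)
        omega
    · rw [pvLb_odd q (Nat.odd_iff.mp hqo)]
      omega

theorem pv_band_eq_lb (k : Nat) (hk : 1 ≤ k) :
    PySem.Int.band (k : Int) (-(k : Int)) = ((pvLb k : Nat) : Int) := by
  unfold PySem.Int.band
  have h1 : (0 : Int) ≤ (k : Int) := by positivity
  have h2 : ¬ (0 : Int) ≤ -(k : Int) := by omega
  simp only [h1, h2, if_false, if_pos]
  have h3 : (-(-(k : Int)) - 1).toNat = k - 1 := by omega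
  have h4 : ((k : Int)).toNat = k := by omega
  rw [h3, h4]
  unfold pvLb
  have := Nat.and_le_left (n := k) (m := k - 1)
  omega

-- ---- Fenwick loop lemmas ----
theorem pv_length_addLoop (fuel : Nat) (tree : List Int) (idx val : Int) :
    (pvAddLoop fuel tree idx val).length = tree.length := by
  induction fuel generalizing tree idx with
  | zero => rfl
  | succ fuel ih =>
    unfold pvAddLoop
    split
    · rw [ih, PySem.List.length_pySetD]
    · rfl

theorem pv_length_pvAdd (tree : List Int) (idx val : Int) :
    (pvAdd tree idx val).length = tree.length := by
  simp [pvAdd, pv_length_addLoop]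

theorem pv_getLoop_res_add (fuel : Nat) (tree : List Int) (idx res d : Int) :
    pvGetLoop fuel tree idx (res + d) = pvGetLoop fuel tree idx res + d := by
  induction fuel generalizing idx res with
  | zero => rfl
  | succ fuel ih =>
    unfold pvGetLoop
    split
    · rw [show res + d + PySem.List.pyGetD tree idx 0
            = res + PySem.List.pyGetD tree idx 0 + d by ring, ih]
    · rfl

theorem pv_pyGetD_replicate (L : Nat) (idx : Int) :
    PySem.List.pyGetD (List.replicate L (0 : Int)) idx 0 = 0 := by
  unfold PySem.List.pyGetD
  cases h : PySem.List.pyGet? (List.replicate L (0 : Int)) idx with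
  | none => rfl
  | some x =>
    have := PySem.List.mem_of_pyGet?_eq_some _ h
    simpa using List.eq_of_mem_replicate this

theorem pv_getLoop_replicate (fuel L : Nat) (idx res : Int) :
    pvGetLoop fuel (List.replicate L 0) idx res = res := by
  induction fuel generalizing idx res with
  | zero => rfl
  | succ fuel ih =>
    unfold pvGetLoop
    split
    · rw [pv_pyGetD_replicate, add_zero, ih]
    · rfl

theorem pv_getD_set (tree : List Int) (j q : Nat) (v : Int) (hj : j < tree.length) :
    PySem.List.pyGetD (tree.set j v) (q : Int) 0
      = if q = j then v else PySem.List.pyGetD tree (q : Int) 0 := by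
  simp only [PySem.List.pyGetD_natCast]
  rcases eq_or_ne q j with rfl | hne
  · simp [List.getD, hj]
  · simp [List.getD, List.getElem?_set_ne hne.symm, hne]

theorem pv_getLoop_set (fg : Nat) (tree : List Int) (j q : Nat) (res v : Int)
    (hj : 1 ≤ j) (hjl : j < tree.length) (hql : q < tree.length) (hfg : q ≤ fg) :
    pvGetLoop fg (tree.set j (PySem.List.pyGetD tree (j : Int) 0 + v)) (q : Int) res
      = pvGetLoop fg tree (q : Int) res + (if j ≤ q ∧ q < j + pvLb j then v else 0) := by
  induction fg generalizing q res with
  | zero =>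
    have : q = 0 := by omega
    subst this
    simp only [pvGetLoop]
    have : ¬ (j ≤ 0 ∧ (0:Nat) < j + pvLb j) := by omega
    rw [if_neg this]; ring
  | succ fg ih =>
    rcases Nat.eq_zero_or_pos q with rfl | hq
    · simp only [Nat.cast_zero, pvGetLoop]
      have hc : ¬ ((0 : Int) > 0) := by omega
      rw [if_neg hc, if_neg hc]
      have : ¬ (j ≤ 0 ∧ (0:Nat) < j + pvLb j) := by omega
      rw [if_neg this]; ring
    · have hlbq := pvLb_le q
      have hlbqp := pvLb_pos q hq
      have hlbjp := pvLb_pos j hj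
      have hband := pv_band_eq_lb q hq
      have hc : ((q : Nat) : Int) > 0 := by exact_mod_cast hq
      have hidx : ((q : Nat) : Int) - PySem.Int.band (q : Int) (-(q : Int))
          = ((q - pvLb q : Nat) : Int) := by
        rw [hband]; omega
      simp only [pvGetLoop, if_pos hc, hidx, pv_getD_set tree j q _ hjl]
      have hq' : q - pvLb q ≤ fg := by omega
      rw [ih (q - pvLb q) _ (by omega) hq']
      rcases eq_or_ne q j with rfl | hne
      · rw [if_pos rfl]
        have h1 : ¬ (q ≤ q - pvLb q ∧ q - pvLb q < q + pvLb q) := by omega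
        have h2 : q ≤ q ∧ q < q + pvLb q := by omega
        rw [if_neg h1, if_pos h2,
          show res + (PySem.List.pyGetD tree (q : Int) 0 + v)
            = res + PySem.List.pyGetD tree (q : Int) 0 + v by ring,
          pv_getLoop_res_add]
        ring
      · rw [if_neg hne]
        congr 1
        by_cases hcond : j ≤ q ∧ q < j + pvLb j
        · rw [if_pos hcond]
          have hlt : j < q := by omega
          have := pvLb_L3 q j hj hlt hcond.2
          have hcond' : j ≤ q - pvLb q ∧ q - pvLb q < j + pvLb j := by omega
          rw [if_pos hcond']
        · rw [if_neg hcond]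
          rw [if_neg ?_]
          intro hcond'
          by_cases hle : j + pvLb j ≤ q
          · have := pvLb_L2 q j hj hcond'.1 hle
            omega
          · omega

theorem pv_addLoop_getLoop (fa : Nat) (tree : List Int) (i : Nat) (v : Int) (q : Nat)
    (fg : Nat) (res : Int)
    (hi : 1 ≤ i) (hfa : tree.length ≤ fa + i) (hql : q < tree.length) (hfg : q ≤ fg) :
    pvGetLoop fg (pvAddLoop fa tree (i : Int) v) (q : Int) res
      = pvGetLoop fg tree (q : Int) res + (if i ≤ q then v else 0) := by
  induction fa generalizing tree i with
  | zero =>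
    simp only [pvAddLoop]
    have : ¬ (i ≤ q) := by omega
    rw [if_neg this]; ring
  | succ fa ih =>
    unfold pvAddLoop
    by_cases hlt : (i : Int) < (tree.length : Int)
    · rw [if_pos hlt]
      have hiltn : i < tree.length := by exact_mod_cast hlt
      have hlbip := pvLb_pos i hi
      have hband := pv_band_eq_lb i hi
      have hidx : (i : Int) + PySem.Int.band (i : Int) (-(i : Int))
          = ((i + pvLb i : Nat) : Int) := by rw [hband]; push_cast; ring
      rw [PySem.List.pySetD_natCast, hidx]
      have hlen : (tree.set i (PySem.List.pyGetD tree (i : Int) 0 + v)).length = tree.length := by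
        simp
      rw [ih (tree.set i (PySem.List.pyGetD tree (i : Int) 0 + v)) (i + pvLb i)
        (by omega) (by omega) (by rw [hlen]; exact hql)]
      rw [pv_getLoop_set fg tree i q res v hi hiltn hql hfg]
      by_cases h1 : i ≤ q
      · rw [if_pos h1]
        by_cases h2 : q < i + pvLb i
        · rw [if_pos ⟨h1, h2⟩, if_neg (by omega)]; ring
        · rw [if_neg (by omega), if_pos (by omega)]; ring
      · rw [if_neg h1, if_neg (by omega), if_neg (by omega)]; ring
    · rw [if_neg hlt]
      have : ¬ (i ≤ q) := by
        have : tree.length ≤ i := by exact_mod_cast not_lt.mp hlt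
        omega
      rw [if_neg this]; ring

theorem pv_getVal_add (tree : List Int) (n : Nat) (hlen : tree.length = n + 1)
    (i : Int) (hi : 1 ≤ i) (q : Int) (hq0 : 0 ≤ q) (hq : q ≤ (n : Int) - 1) (v : Int) :
    pvGetVal (pvAdd tree i v) q = pvGetVal tree q + (if i ≤ q then v else 0) := by
  have hp : (i + 1) = ((i.toNat + 1 : Nat) : Int) := by omega
  have hqp : (q + 1) = ((q.toNat + 1 : Nat) : Int) := by omega
  have hfg : (q + 1).toNat = q.toNat + 1 := by omega
  have hn1 : q.toNat + 1 < tree.length := by omega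
  unfold pvGetVal pvAdd
  rw [hfg, hp, hqp]
  rw [pv_addLoop_getLoop tree.length tree (i.toNat + 1) v (q.toNat + 1) (q.toNat + 1) 0
    (by omega) (by omega) hn1 (by omega)]
  congr 1
  by_cases h : i ≤ q
  · rw [if_pos (by omega : i.toNat + 1 ≤ q.toNat + 1), if_pos h]
  · rw [if_neg (by omega), if_neg h]

theorem pv_getVal_neg (tree : List Int) (c : Int) (hc : c < 0) : pvGetVal tree c = 0 := by
  unfold pvGetVal
  rw [show (c + 1).toNat = 0 by omega]
  rfl

theorem pv_tree_step (tree : List Int) (n : Nat) (hlen : tree.length = n + 1) (j dj q : Int)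
    (hq0 : 0 ≤ q) (hq : q ≤ (n : Int) - 1) :
    pvGetVal (if j > 0 then pvAdd tree j dj else tree) q
      = pvGetVal tree q + (if 0 < j ∧ j ≤ q then dj else 0) := by
  by_cases h : j > 0
  · rw [if_pos h, pv_getVal_add tree n hlen j (by omega) q hq0 hq dj]
    by_cases h2 : j ≤ q
    · rw [if_pos h2, if_pos ⟨by omega, h2⟩]
    · rw [if_neg h2, if_neg (by omega)]
  · rw [if_neg h, if_neg (by omega)]
    ring

theorem pv_length_tree_step (tree : List Int) (j dj : Int) :
    (if j > 0 then pvAdd tree j dj else tree).length = tree.length := by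
  by_cases h : j > 0
  · rw [if_pos h, pv_length_pvAdd]
  · rw [if_neg h]

theorem pv_foldA_length (nums : List Int) (L : List Int) (t : List Int) :
    (L.foldl (fun tree i => if pvCheckA nums i then pvAdd tree i 1 else tree) t).length
      = t.length := by
  induction L generalizing t with
  | nil => rfl
  | cons i L ih =>
    rw [List.foldl_cons, ih]
    by_cases h : pvCheckA nums i
    · rw [if_pos h, pv_length_pvAdd]
    · rw [if_neg h]

theorem pv_adds_getVal (n : Nat) (L : List Int) (t : List Int)
    (hlen : t.length = n + 1) (hL : ∀ i ∈ L, 1 ≤ i) (q : Int) (hq0 : 0 ≤ q)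
    (hq : q ≤ (n : Int) - 1) :
    pvGetVal (L.foldl (fun tree i => pvAdd tree i 1) t) q
      = pvGetVal t q + (L.countP (fun p => decide (p ≤ q)) : Int) := by
  induction L generalizing t with
  | nil => simp
  | cons i L ih =>
    rw [List.foldl_cons, ih (pvAdd t i 1) (by rw [pv_length_pvAdd]; exact hlen)
      (fun x hx => hL x (by simp [hx])),
      pv_getVal_add t n hlen i (hL i (by simp)) q hq0 hq 1, List.countP_cons]
    by_cases h : i ≤ q
    · rw [if_pos h, if_pos (by simpa using h)]
      push_cast
      ring
    · rw [if_neg h, if_neg (by simpa using h)]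
      push_cast
      ring

theorem pv_filter_range_eq (nums : List Int) :
    (PySem.List.pyRange 1 (nums.length : Int) 1).filter (pvCheckA nums)
      = (PySem.List.pyRange 1 ((nums.length : Int) - 1) 1).filter (pvCheckA nums) := by
  rcases lt_or_ge (nums.length : Int) 2 with h | h
  · rw [PySem.List.pyRange_one_eq_nil (by omega), PySem.List.pyRange_one_eq_nil (by omega)]
  · have hsplit := PySem.List.pyRange_one_append 1 ((nums.length : Int) - 1)
      (nums.length : Int) (by omega) (by omega)
    have htail : PySem.List.pyRange ((nums.length : Int) - 1) (nums.length : Int) 1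
        = [(nums.length : Int) - 1] := by
      rw [PySem.List.pyRange_one_cons (by omega), PySem.List.pyRange_one_eq_nil (by omega)]
    have hchk : pvCheckA nums ((nums.length : Int) - 1) = false := by
      unfold pvCheckA
      have h2 : decide ((nums.length : Int) - 1 < (nums.length : Int) - 1) = false := by simp
      rw [h2, Bool.and_false, Bool.false_and]
    rw [hsplit, htail, List.filter_append]
    simp [hchk]

-- ---- dict-counter lemmas (B side) ----
theorem pv_checkB_eq_checkA (nums : List Int) (i : Int) : pvCheckB nums i = pvCheckA nums i := rfl

theorem pv_prefix_map_one (L : List Int) (q : Int) :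
    pvPrefix (L.map (fun i => (i, 1))) q = (L.countP (fun p => decide (p ≤ q)) : Int) := by
  induction L with
  | nil => rfl
  | cons x L ih =>
    simp only [List.map_cons, pvPrefix, List.countP_cons] at *
    by_cases h : x ≤ q
    · rw [List.filter_cons_of_pos (by simpa using h), if_pos (by simpa using h)]
      simp only [List.map_cons, List.sum_cons]
      push_cast
      omega
    · rw [List.filter_cons_of_neg (by simpa using h), if_neg (by simpa using h)]
      omega

theorem pv_prefix_cons (kv : Int × Int) (t : List (Int × Int)) (q : Int) :
    pvPrefix (kv :: t) q = (if kv.1 ≤ q then kv.2 else 0) + pvPrefix t q := by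
  unfold pvPrefix
  rw [List.filter_cons]
  by_cases h : kv.1 ≤ q
  · simp [h]
  · simp [h]

theorem pv_prefix_dset (l : List (Int × Int)) (k v q : Int) :
    pvPrefix (pvDSet l k (pvDGet l k + v)) q
      = pvPrefix l q + (if k ≤ q then v else 0) := by
  induction l with
  | nil =>
    simp only [pvDSet, pvDGet, pv_prefix_cons]
    by_cases h : k ≤ q
    · simp [pvPrefix, h]
    · simp [pvPrefix, h]
  | cons kv t ih =>
    by_cases hk : kv.1 = k
    · simp only [pvDSet, pvDGet, hk, if_true, pv_prefix_cons]
      by_cases h : k ≤ q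
      · rw [if_pos h, if_pos h, if_pos h]
        ring
      · rw [if_neg h, if_neg h, if_neg h]
        ring
    · simp only [pvDSet, pvDGet, if_neg hk, pv_prefix_cons, ih]
      ring

theorem pv_mem_dset (l : List (Int × Int)) (k v : Int) (kv : Int × Int)
    (h : kv ∈ pvDSet l k v) : kv.1 = k ∨ kv ∈ l := by
  induction l with
  | nil =>
    simp only [pvDSet, List.mem_singleton] at h
    subst h
    exact Or.inl rfl
  | cons hd t ih =>
    simp only [pvDSet] at h
    by_cases hk : hd.1 = k
    · rw [if_pos hk] at h
      rcases List.mem_cons.mp h with rfl | h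
      · exact Or.inl rfl
      · exact Or.inr (List.mem_cons_of_mem _ h)
    · rw [if_neg hk] at h
      rcases List.mem_cons.mp h with rfl | h
      · exact Or.inr (List.mem_cons_self)
      · rcases ih h with h1 | h1
        · exact Or.inl h1
        · exact Or.inr (List.mem_cons_of_mem _ h1)

theorem pv_prefix_lower (l : List (Int × Int)) (q : Int)
    (hpos : ∀ kv ∈ l, 1 ≤ kv.1) (hq : q < 1) : pvPrefix l q = 0 := by
  unfold pvPrefix
  rw [List.filter_eq_nil_iff.mpr (fun kv hkv => by
    have := hpos kv hkv
    simp
    omega)]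
  rfl

-- ---- invariant and simulation ----
def pvInv (nums tree : List Int) (cnt : List (Int × Int)) : Prop :=
  tree.length = nums.length + 1 ∧ (∀ kv ∈ cnt, 1 ≤ kv.1) ∧
  (∀ q : Int, 0 ≤ q → q ≤ (nums.length : Int) - 1 → pvGetVal tree q = pvPrefix cnt q)

theorem pv_dstep (cnt : List (Int × Int)) (j d : Int) (hpos : ∀ kv ∈ cnt, 1 ≤ kv.1) :
    (∀ kv ∈ (if j > 0 then pvDSet cnt j (pvDGet cnt j + d) else cnt), 1 ≤ kv.1) ∧
    (∀ q : Int, pvPrefix (if j > 0 then pvDSet cnt j (pvDGet cnt j + d) else cnt) q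
       = pvPrefix cnt q + (if 0 < j ∧ j ≤ q then d else 0)) := by
  by_cases h : j > 0
  · rw [if_pos h]
    refine ⟨fun kv hkv => ?_, fun q => ?_⟩
    · rcases pv_mem_dset cnt j _ kv hkv with h1 | h1
      · omega
      · exact hpos kv h1
    · rw [pv_prefix_dset]
      by_cases h2 : j ≤ q
      · rw [if_pos h2, if_pos ⟨h, h2⟩]
      · rw [if_neg h2, if_neg (by omega)]
  · rw [if_neg h]
    refine ⟨hpos, fun q => ?_⟩
    rw [if_neg (by omega)]
    ring

theorem pv_step_sim (q nums tree : List Int) (cnt : List (Int × Int)) (res : List Int)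
    (hq : pvQOK (nums.length : Int) q) (hInv : pvInv nums tree cnt) :
    (pvStepA (nums, tree, res) q).1 = (pvStepB (nums, cnt, res) q).1 ∧
    pvInv (pvStepA (nums, tree, res) q).1 (pvStepA (nums, tree, res) q).2.1
      (pvStepB (nums, cnt, res) q).2.1 ∧
    (pvStepA (nums, tree, res) q).2.2 = (pvStepB (nums, cnt, res) q).2.2 := by
  obtain ⟨hlen3, hq1, hq2⟩ := hq
  obtain ⟨hlenT, hpos, hval⟩ := hInv
  by_cases ha : PySem.List.pyGetD q 0 0 = 1
  · -- count query
    simp only [pvStepA, pvStepB, if_pos ha]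
    refine ⟨by trivial, ⟨hlenT, hpos, hval⟩, ?_⟩
    congr 2
    set b := PySem.List.pyGetD q 1 0 with hbdef
    set c := PySem.List.pyGetD q 2 0 with hcdef
    by_cases hbc : b = c
    · rw [if_neg (by simpa using hbc), if_pos hbc]
    · obtain ⟨hc, hb⟩ := hq1 ha hbc
      rw [if_pos hbc, if_neg hbc, pv_checkB_eq_checkA, pv_checkB_eq_checkA]
      have hgc : pvGetVal tree c = pvPrefix cnt c := by
        rcases le_or_gt 0 c with h0 | h0
        · exact hval c h0 hc
        · rw [pv_getVal_neg tree c h0, pv_prefix_lower cnt c hpos (by omega)]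
      rw [hgc]
      by_cases hb0 : b > 0
      · rw [if_pos hb0, if_pos hb0, hval (b - 1) (by omega) (by omega)]
      · rw [if_neg hb0, if_neg hb0]
  · -- update query
    obtain ⟨hbl, hbu⟩ := hq2 ha
    simp only [pvStepA, pvStepB, if_neg ha, List.zip_cons_cons, List.zip_nil_right,
      List.foldl_cons, List.foldl_nil, pv_checkB_eq_checkA]
    set b := PySem.List.pyGetD q 1 0 with hbdef
    set c := PySem.List.pyGetD q 2 0 with hcdef
    set numsN := PySem.List.pySetD nums b c with hnumsN
    have hlenN : numsN.length = nums.length := PySem.List.length_pySetD nums b c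
    set d1 := pvB2I (pvCheckA numsN (b - 1)) - pvB2I (pvCheckA nums (b - 1)) with hd1
    set d2 := pvB2I (pvCheckA numsN b) - pvB2I (pvCheckA nums b) with hd2
    set d3 := pvB2I (pvCheckA numsN (b + 1)) - pvB2I (pvCheckA nums (b + 1)) with hd3
    set t1 := (if b - 1 > 0 then pvAdd tree (b - 1) d1 else tree) with ht1
    set t2 := (if b > 0 then pvAdd t1 b d2 else t1) with ht2
    set t3 := (if b + 1 > 0 then pvAdd t2 (b + 1) d3 else t2) with ht3
    set c1 := (if b - 1 > 0 then pvDSet cnt (b - 1) (pvDGet cnt (b - 1) + d1) else cnt) with hc1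
    set c2 := (if b > 0 then pvDSet c1 b (pvDGet c1 b + d2) else c1) with hc2
    set c3 := (if b + 1 > 0 then pvDSet c2 (b + 1) (pvDGet c2 (b + 1) + d3) else c2) with hc3
    refine ⟨by trivial, ?_, by trivial⟩
    have hlt1 : t1.length = nums.length + 1 := by rw [ht1, pv_length_tree_step, hlenT]
    have hlt2 : t2.length = nums.length + 1 := by rw [ht2, pv_length_tree_step, hlt1]
    have hlt3 : t3.length = nums.length + 1 := by rw [ht3, pv_length_tree_step, hlt2]
    obtain ⟨hp1, hs1⟩ := pv_dstep cnt (b - 1) d1 hpos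
    rw [← hc1] at hp1 hs1
    obtain ⟨hp2, hs2⟩ := pv_dstep c1 b d2 hp1
    rw [← hc2] at hp2 hs2
    obtain ⟨hp3, hs3⟩ := pv_dstep c2 (b + 1) d3 hp2
    rw [← hc3] at hp3 hs3
    refine ⟨by rw [hlenN, hlt3], hp3, ?_⟩
    intro r hr0 hrn
    rw [hlenN] at hrn
    have hA1 := pv_tree_step tree nums.length hlenT (b - 1) d1 r hr0 hrn
    have hA2 := pv_tree_step t1 nums.length hlt1 b d2 r hr0 hrn
    have hA3 := pv_tree_step t2 nums.length hlt2 (b + 1) d3 r hr0 hrn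
    rw [← ht1] at hA1
    rw [← ht2] at hA2
    rw [← ht3] at hA3
    rw [hA3, hA2, hA1, hs3 r, hs2 r, hs1 r, hval r hr0 hrn]

theorem pv_fold_sim (qs : List (List Int)) (nums tree : List Int) (cnt : List (Int × Int))
    (res : List Int) (hqs : ∀ q ∈ qs, pvQOK (nums.length : Int) q) (hInv : pvInv nums tree cnt) :
    (qs.foldl pvStepA (nums, tree, res)).2.2 = (qs.foldl pvStepB (nums, cnt, res)).2.2 := by
  induction qs generalizing nums tree cnt res with
  | nil => rfl
  | cons q qs ih =>
    obtain ⟨h1, h2, h3⟩ := pv_step_sim q nums tree cnt res (hqs q (by simp)) hInv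
    have hlenA : (pvStepA (nums, tree, res) q).1.length = nums.length := by
      unfold pvStepA
      by_cases ha : PySem.List.pyGetD q 0 0 = 1
      · rw [if_pos ha]
      · rw [if_neg ha]
        exact PySem.List.length_pySetD nums _ _
    have hqs' : ∀ q' ∈ qs, pvQOK ((pvStepA (nums, tree, res) q).1.length : Int) q' := by
      intro q' hq'
      rw [hlenA]
      exact hqs q' (by simp [hq'])
    have := ih (pvStepA (nums, tree, res) q).1 (pvStepA (nums, tree, res) q).2.1
      (pvStepB (nums, cnt, res) q).2.1 (pvStepA (nums, tree, res) q).2.2 hqs' h2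
    simp only [List.foldl_cons]
    calc (qs.foldl pvStepA (pvStepA (nums, tree, res) q)).2.2
        = (qs.foldl pvStepA ((pvStepA (nums, tree, res) q).1,
            (pvStepA (nums, tree, res) q).2.1, (pvStepA (nums, tree, res) q).2.2)).2.2 := rfl
      _ = (qs.foldl pvStepB ((pvStepB (nums, cnt, res) q).1,
            (pvStepB (nums, cnt, res) q).2.1, (pvStepB (nums, cnt, res) q).2.2)).2.2 := by
            rw [← h1, ← h3]; exact this
      _ = (qs.foldl pvStepB (pvStepB (nums, cnt, res) q)).2.2 := rfl

theorem pv_init_inv (nums : List Int) :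
    pvInv nums
      ((PySem.List.pyRange 1 (nums.length : Int) 1).foldl
        (fun tree i => if pvCheckA nums i then pvAdd tree i 1 else tree)
        (List.replicate (nums.length + 1) 0))
      (((PySem.List.pyRange 1 ((nums.length : Int) - 1) 1).filter (pvCheckB nums)).map
        (fun i => (i, 1))) := by
  refine ⟨by rw [pv_foldA_length]; simp, ?_, ?_⟩
  · intro kv hkv
    obtain ⟨i, hi, rfl⟩ := List.mem_map.mp hkv
    have := PySem.List.mem_pyRange_one.mp (List.mem_filter.mp hi).1
    simpa using this.1
  · intro r hr0 hrn
    have hshape : (PySem.List.pyRange 1 (nums.length : Int) 1).foldl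
        (fun tree i => if pvCheckA nums i then pvAdd tree i 1 else tree)
        (List.replicate (nums.length + 1) 0)
      = ((PySem.List.pyRange 1 (nums.length : Int) 1).filter (pvCheckA nums)).foldl
        (fun tree i => pvAdd tree i 1) (List.replicate (nums.length + 1) 0) :=
      PySem.List.foldl_if_eq_foldl_filter _ _ _ _
    rw [hshape, pv_filter_range_eq nums,
      pv_adds_getVal nums.length _ _ (by simp)
        (fun i hi => by
          have := (List.mem_filter.mp hi).1
          have := PySem.List.mem_pyRange_one.mp this
          omega) r hr0 hrn]
    have hz : pvGetVal (List.replicate (nums.length + 1) 0) r = 0 := by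
      unfold pvGetVal
      exact pv_getLoop_replicate _ _ _ _
    rw [hz, pv_prefix_map_one]
    have hfe : (PySem.List.pyRange 1 ((nums.length : Int) - 1) 1).filter (pvCheckA nums)
        = (PySem.List.pyRange 1 ((nums.length : Int) - 1) 1).filter (pvCheckB nums) := rfl
    rw [hfe]
    ring

-- ===== VERDICT (by name: the statement is the Claim_ definition above) =====
theorem countOfPeaks_spec : Claim_equal_countOfPeaks := by
  intro nums queries _hDom hPre
  unfold Spec_countOfPeaks countOfPeaks countOfPeaks_alt
  exact pv_fold_sim queries nums _ _ [] hPre (pv_init_inv nums)
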